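-- pv_equiv track=rewrite | github.com/Dagbert1337/AwD-laby | laby/kolos1 mat xd/2023_3.py | search_similar_patterns
-- ===== SOURCE A (Python) =====
-- def search_similar_patterns(t, w, k):
-- 	matches = 0
-- 	ans = [0] * len(t)
-- 	i = 0
-- 	t_end = len(t)
-- 	w_end = len(w)
-- 	while i < t_end - w_end + 1:
-- 		k_left = k
--
-- 		for j in range(w_end):
-- 			if t[i+j] != w[j]:
-- 				k_left -= 1
--
-- 		if k_left >= 0:
-- 			ans[matches] = i
-- 			matches += 1
--
-- 		i += 1
--
-- 	f_ans = [ans[g] for g in range(matches)]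
--
-- 	return f_ans
-- ===== SOURCE B (Python) =====
-- def search_similar_patterns(t, w, k):
--     n, m = len(t), len(w)
--     s = n - m + 1
--     if s <= 0:
--         return []
--     # column-major: accumulate, for each pattern position j, one mismatch
--     # table over all window starts, then filter the starts once
--     mism = [0] * s
--     for j, wc in enumerate(w):
--         for i, c in enumerate(t[j:j + s]):
--             if c != wc:
--                 mism[i] += 1
--     return [i for i, d in enumerate(mism) if d <= k]
-- ===== Notes on version B (the rewrite author's own statement) =====
-- stated objective: alternative
-- what changed: Replaced the per-window rescan (outer while over window starts, inner full scan of the pattern decrementing a budget, results written into a preallocated array sized len(t)) by a column-major algorithm: for each pattern position j it sweeps the text slice t[j:j+s] accumulating a mismatch-count table indexed by window start, then filters the starts once at the end.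
import Mathlib
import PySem

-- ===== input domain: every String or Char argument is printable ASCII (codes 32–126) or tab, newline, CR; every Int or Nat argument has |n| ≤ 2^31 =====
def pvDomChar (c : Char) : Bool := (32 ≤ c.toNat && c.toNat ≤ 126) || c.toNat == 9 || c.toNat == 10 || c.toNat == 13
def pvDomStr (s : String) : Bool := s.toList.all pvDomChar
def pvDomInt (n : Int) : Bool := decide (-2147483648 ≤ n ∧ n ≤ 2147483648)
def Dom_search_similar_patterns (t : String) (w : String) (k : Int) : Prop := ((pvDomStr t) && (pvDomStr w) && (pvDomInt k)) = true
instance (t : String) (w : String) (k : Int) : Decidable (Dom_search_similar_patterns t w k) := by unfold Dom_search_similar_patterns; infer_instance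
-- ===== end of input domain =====

-- B replaces A's per-window rescan by a column-major mismatch-count table plus one final filter
-- (objective: a genuinely different traversal of the same cost, not claimed faster).

-- ===== PORT A =====
-- while-loop over window starts; state = (matches, ans); inner for-loop decrements k_left
def search_similar_patterns (t : String) (w : String) (k : Int) : List Int :=
  let tl := t.toList
  let wl := w.toList
  let t_end : Int := PySem.List.len tl
  let w_end : Int := PySem.List.len wl
  let st :=
    (PySem.List.pyRange 0 (t_end - w_end + 1) 1).foldl
      (fun st i =>
        let k_left :=
          (PySem.List.pyRange 0 w_end 1).foldl
            (fun kl j =>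
              if PySem.List.pyGetD tl (i + j) ' ' ≠ PySem.List.pyGetD wl j ' ' then kl - 1 else kl)
            k
        if k_left ≥ 0 then (st.1 + 1, PySem.List.pySetD st.2 st.1 i) else st)
      ((0 : Int), List.replicate tl.length (0 : Int))
  (PySem.List.pyRange 0 st.1 1).map (fun g => PySem.List.pyGetD st.2 g 0)

-- ===== PORT B =====
-- column-major: for each (j, wc) in enumerate(w), sweep the slice t[j:j+s] adding into mism; then filter
def search_similar_patterns_alt (t : String) (w : String) (k : Int) : List Int :=
  let tl := t.toList
  let wl := w.toList
  let n : Int := PySem.List.len tl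
  let m : Int := PySem.List.len wl
  let s : Int := n - m + 1
  if s ≤ 0 then []
  else
    let mism :=
      (PySem.List.enumerate wl 0).foldl
        (fun mism jwc =>
          (PySem.List.enumerate (PySem.List.slice tl (some jwc.1) (some (jwc.1 + s))) 0).foldl
            (fun mism ic =>
              if ic.2 ≠ jwc.2 then
                PySem.List.pySetD mism ic.1 (PySem.List.pyGetD mism ic.1 0 + 1)
              else mism)
            mism)
        (List.replicate s.toNat (0 : Int))
    (PySem.List.enumerate mism 0).filterMap (fun idd => if idd.2 ≤ k then some idd.1 else none)

-- ===== PRECONDITION & SPEC =====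
-- Pre_ excludes only (w = "" with k ≥ 0), where A raises IndexError (it appends len(t)+1
-- results into an array of only len(t) slots); A returns normally everywhere else.
def Pre_search_similar_patterns (t : String) (w : String) (k : Int) : Prop :=
  ¬ (w = "" ∧ 0 ≤ k)
instance (t : String) (w : String) (k : Int) : Decidable (Pre_search_similar_patterns t w k) := by
  unfold Pre_search_similar_patterns; infer_instance
def pvWitness_search_similar_patterns : String × String × Int := ("abcab", "ab", 1)

def Spec_search_similar_patterns (t : String) (w : String) (k : Int) (out : List Int) : Prop :=
  out = search_similar_patterns_alt t w k
instance (t : String) (w : String) (k : Int) (out : List Int) :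
    Decidable (Spec_search_similar_patterns t w k out) := by
  unfold Spec_search_similar_patterns; infer_instance

-- ===== CLAIM (what is proved, stated in full; the proofs are below) =====
def Claim_equal_search_similar_patterns : Prop := ∀ (t : String) (w : String) (k : Int), Dom_search_similar_patterns t w k → Pre_search_similar_patterns t w k → Spec_search_similar_patterns t w k (search_similar_patterns t w k)

-- ===== LEMMAS AND PROOFS =====

-- mismatch count of the window of t starting at i against wl
def pvCm (tl wl : List Char) (i : Nat) : Int :=
  ((List.range wl.length).countP (fun j => tl.getD (i + j) ' ' ≠ wl.getD j ' ') : Int)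

-- the common value of both programs
def pvSpec (tl wl : List Char) (k : Int) : List Int :=
  List.map (fun i : Nat => (i : Int))
    ((List.range (tl.length + 1 - wl.length)).filter (fun i => pvCm tl wl i ≤ k))

-- small getD helpers
theorem pv_map_getD_range (l : List Int) (d : Int) :
    (List.range l.length).map (fun i => l.getD i d) = l := by
  apply List.ext_getElem
  · simp
  · intro i h1 h2; simp [List.getD_eq_getElem?_getD, List.getElem?_eq_getElem h2]

theorem pv_getD_set (mism : List Int) (i : Nat) (v d : Int) (p : Nat) (h : i < mism.length) :
    (mism.set i v).getD p d = if p = i then v else mism.getD p d := by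
  rw [List.getD_eq_getElem?_getD, List.getD_eq_getElem?_getD, List.getElem?_set]
  split
  · next hpi => simp [hpi.symm, List.getElem?_eq_getElem (hpi ▸ h)]
  · next hne => rw [if_neg (fun hc => hne hc.symm)]

theorem pv_set_append (A ps : List Int) (v p : Int) :
    (A ++ p :: ps).set A.length v = A ++ v :: ps := by simp

-- generic: the decrement-fold computes k minus the count
theorem pv_foldl_dec {α : Type} (p : α → Prop) [DecidablePred p] (l : List α) (k : Int) :
    l.foldl (fun kl j => if p j then kl - 1 else kl) k = k - (l.countP (fun x => decide (p x)) : Int) := by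
  induction l generalizing k with
  | nil => simp
  | cons x xs ih =>
      simp only [List.foldl_cons, List.countP_cons, ih]
      by_cases hx : p x <;> simp [hx] <;> push_cast <;> ring

theorem pv_pyRange_nat (N : Nat) :
    PySem.List.pyRange 0 (N : Int) 1 = List.map (fun j : Nat => (j : Int)) (List.range N) := by
  apply List.ext_getElem
  · simp [PySem.List.length_pyRange_one]
  · intro i h1 h2
    simp [PySem.List.getElem_pyRange_one]

-- A's inner for-loop computes k - pvCm
theorem pvA_inner (tl wl : List Char) (k : Int) (iN : Nat) :
    (PySem.List.pyRange 0 (PySem.List.len wl) 1).foldl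
      (fun kl j =>
        if PySem.List.pyGetD tl ((iN : Int) + j) ' ' ≠ PySem.List.pyGetD wl j ' ' then kl - 1 else kl)
      k = k - pvCm tl wl iN := by
  rw [PySem.List.len_eq, pv_pyRange_nat, List.foldl_map]
  simp only [← Nat.cast_add, PySem.List.pyGetD_natCast]
  rw [pv_foldl_dec (fun jN : Nat => tl.getD (iN + jN) ' ' ≠ wl.getD jN ' ')]
  unfold pvCm
  norm_num

-- A's loop body, named for the lemmas below (identical to the lambda in the port)
def pvAstep (tl wl : List Char) (k : Int) (st : Int × List Int) (i : Int) : Int × List Int :=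
  let k_left :=
    (PySem.List.pyRange 0 (PySem.List.len wl) 1).foldl
      (fun kl j =>
        if PySem.List.pyGetD tl (i + j) ' ' ≠ PySem.List.pyGetD wl j ' ' then kl - 1 else kl)
      k
  if k_left ≥ 0 then (st.1 + 1, PySem.List.pySetD st.2 st.1 i) else st

-- loop invariant for A: matches counts the filtered starts, which sit as a prefix of ans
theorem pvA_loop (tl wl : List Char) (k : Int) (hsafe : wl ≠ [] ∨ k < 0)
    (I : Nat) (hI : I ≤ tl.length + 1 - wl.length) :
    ∃ pad : List Int,
      (List.map (fun i : Nat => (i : Int)) (List.range I)).foldl (pvAstep tl wl k)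
          ((0 : Int), List.replicate tl.length (0 : Int))
        = ((((List.range I).filter (fun i => pvCm tl wl i ≤ k)).length : Int),
           List.map (fun i : Nat => (i : Int)) ((List.range I).filter (fun i => pvCm tl wl i ≤ k)) ++ pad)
      ∧ ((List.range I).filter (fun i => pvCm tl wl i ≤ k)).length + pad.length = tl.length := by
  induction I with
  | zero => exact ⟨List.replicate tl.length 0, by simp, by simp⟩
  | succ I ih =>
      obtain ⟨pad, hfold, hlen⟩ := ih (Nat.le_of_succ_le hI)
      rw [List.range_succ, List.map_append, List.foldl_append, hfold]
      simp only [List.map_cons, List.map_nil, List.foldl_cons, List.foldl_nil]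
      rw [List.filter_append]
      simp only [pvAstep, pvA_inner]
      by_cases hp : pvCm tl wl I ≤ k
      · -- window I qualifies: it is appended at position F.length
        have hcm0 : (0 : Int) ≤ pvCm tl wl I := by unfold pvCm; positivity
        have hwl : wl ≠ [] := by
          rcases hsafe with h | h
          · exact h
          · exact absurd (le_trans hcm0 hp) (by omega)
        have hFlen : ((List.range I).filter (fun i => pvCm tl wl i ≤ k)).length < tl.length := by
          have h1 : ((List.range I).filter (fun i => pvCm tl wl i ≤ k)).length ≤ I :=
            le_trans (List.length_filter_le _ _) (by simp)
          have h2 : 1 ≤ wl.length := by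
            cases wl with
            | nil => exact absurd rfl hwl
            | cons c cs => simp
          omega
        obtain ⟨p, ps, rfl⟩ : ∃ p ps, pad = p :: ps := by
          cases pad with
          | nil => simp at hlen; omega
          | cons p ps => exact ⟨p, ps, rfl⟩
        refine ⟨ps, ?_, ?_⟩
        · rw [if_pos (by omega)]
          simp only [List.filter_cons, List.filter_nil, decide_eq_true_eq, if_pos hp]
          rw [PySem.List.pySetD_natCast]
          simp only [Prod.mk.injEq]
          refine ⟨by simp, ?_⟩
          have hlm : ((List.range I).filter (fun i => pvCm tl wl i ≤ k)).length
              = (List.map (fun i : Nat => (i : Int)) ((List.range I).filter (fun i => pvCm tl wl i ≤ k))).length := by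
            simp
          rw [hlm, pv_set_append]
          simp
        · simp only [List.filter_cons, List.filter_nil, decide_eq_true_eq]
          rw [if_pos hp]
          simp at hlen ⊢
          omega
      · refine ⟨pad, ?_, ?_⟩
        · rw [if_neg (by omega)]
          simp only [List.filter_cons, List.filter_nil, decide_eq_true_eq]
          rw [if_neg hp]
          simp
        · simp only [List.filter_cons, List.filter_nil, decide_eq_true_eq]
          rw [if_neg hp]
          simpa using hlen

theorem pvA_unfold (t w : String) (k : Int) :
    search_similar_patterns t w k =
      ((PySem.List.pyRange 0
          ((PySem.List.pyRange 0 ((t.toList.length : Int) - w.toList.length + 1) 1).foldl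
            (pvAstep t.toList w.toList k)
            ((0 : Int), List.replicate t.toList.length (0 : Int))).1 1).map
        (fun g =>
          PySem.List.pyGetD
            ((PySem.List.pyRange 0 ((t.toList.length : Int) - w.toList.length + 1) 1).foldl
              (pvAstep t.toList w.toList k)
              ((0 : Int), List.replicate t.toList.length (0 : Int))).2 g 0)) := rfl

theorem pvA_eq (t w : String) (k : Int) (h : Pre_search_similar_patterns t w k) :
    search_similar_patterns t w k = pvSpec t.toList w.toList k := by
  have hsafe : w.toList ≠ [] ∨ k < 0 := by
    by_cases hw : w = ""
    · rcases lt_or_ge k 0 with hk | hk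
      · exact Or.inr hk
      · exact absurd ⟨hw, hk⟩ h
    · exact Or.inl (by simpa using hw)
  rw [pvA_unfold]
  by_cases hS : ((t.toList.length : Int) - w.toList.length + 1) ≤ 0
  · rw [PySem.List.pyRange_one_eq_nil (a := 0)
        (b := ((t.toList.length : Int) - w.toList.length + 1)) hS]
    rw [List.foldl_nil]
    have h0 : t.toList.length + 1 - w.toList.length = 0 := by omega
    unfold pvSpec
    rw [h0]
    simp [PySem.List.pyRange_one_eq_nil]
  · have hcast : ((t.toList.length : Int) - w.toList.length + 1)
        = ((t.toList.length + 1 - w.toList.length : Nat) : Int) := by push_cast; omega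
    rw [hcast, pv_pyRange_nat]
    obtain ⟨pad, hfold, hlen⟩ := pvA_loop t.toList w.toList k hsafe
      (t.toList.length + 1 - w.toList.length) (le_refl _)
    rw [hfold]
    unfold pvSpec
    rw [pv_pyRange_nat, List.map_map]
    trans (List.map
        (fun gN : Nat => (List.map (fun i : Nat => (i : Int))
            ((List.range (t.toList.length + 1 - w.toList.length)).filter
              (fun i => pvCm t.toList w.toList i ≤ k))).getD gN 0)
        (List.range
          ((List.range (t.toList.length + 1 - w.toList.length)).filter
            (fun i => pvCm t.toList w.toList i ≤ k)).length))
    · refine List.map_congr_left ?_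
      intro gN hg
      show PySem.List.pyGetD _ (gN : Int) 0 = _
      rw [PySem.List.pyGetD_natCast]
      exact List.getD_append _ _ _ _ (by simpa using List.mem_range.mp hg)
    · have hlA : ((List.range (t.toList.length + 1 - w.toList.length)).filter
            (fun i => pvCm t.toList w.toList i ≤ k)).length
          = (List.map (fun i : Nat => (i : Int))
              ((List.range (t.toList.length + 1 - w.toList.length)).filter
                (fun i => pvCm t.toList w.toList i ≤ k))).length := by simp
      rw [hlA, pv_map_getD_range]

-- B's inner sweep: adds the column-j mismatch indicator to every entry of mism
theorem pvB_inner (wc : Char) (cs : List Char) (i0 : Nat) (mism : List Int)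
    (h : i0 + cs.length ≤ mism.length) :
    ((PySem.List.enumerate cs (i0 : Int)).foldl
        (fun mism ic =>
          if ic.2 ≠ wc then PySem.List.pySetD mism ic.1 (PySem.List.pyGetD mism ic.1 0 + 1)
          else mism)
        mism).length = mism.length ∧
    ∀ p : Nat,
      ((PySem.List.enumerate cs (i0 : Int)).foldl
        (fun mism ic =>
          if ic.2 ≠ wc then PySem.List.pySetD mism ic.1 (PySem.List.pyGetD mism ic.1 0 + 1)
          else mism)
        mism).getD p 0
      = mism.getD p 0 +
        (if i0 ≤ p ∧ p < i0 + cs.length ∧ cs.getD (p - i0) ' ' ≠ wc then 1 else 0) := by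
  induction cs generalizing i0 mism with
  | nil =>
      refine ⟨by simp [PySem.List.enumerate_nil], ?_⟩
      intro p
      rw [PySem.List.enumerate_nil]
      simp only [List.foldl_nil, List.length_nil]
      rw [if_neg (by rintro ⟨h1, h2, _⟩; omega)]
      ring
  | cons c cs ih =>
      rw [PySem.List.enumerate_cons,
          show (i0 : Int) + 1 = ((i0 + 1 : Nat) : Int) by push_cast; ring]
      simp only [List.foldl_cons]
      have hi0 : i0 < mism.length := by simp at h; omega
      have hst1 : (if c ≠ wc then
            PySem.List.pySetD mism (i0 : Int) (PySem.List.pyGetD mism (i0 : Int) 0 + 1)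
          else mism)
          = if c ≠ wc then mism.set i0 (mism.getD i0 0 + 1) else mism := by
        rw [PySem.List.pySetD_natCast, PySem.List.pyGetD_natCast]
      have hlen1 : (if c ≠ wc then
            PySem.List.pySetD mism (i0 : Int) (PySem.List.pyGetD mism (i0 : Int) 0 + 1)
          else mism).length = mism.length := by
        rw [hst1]; split <;> simp
      obtain ⟨ihl, ihg⟩ := ih (i0 + 1)
        (if c ≠ wc then
            PySem.List.pySetD mism (i0 : Int) (PySem.List.pyGetD mism (i0 : Int) 0 + 1)
          else mism)
        (by rw [hlen1]; simp at h; omega)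
      refine ⟨by rw [ihl, hlen1], ?_⟩
      intro p
      rw [ihg p, hst1]
      by_cases hpi : p = i0
      · subst hpi
        have hL : (if c ≠ wc then mism.set p (mism.getD p 0 + 1) else mism).getD p 0
            = mism.getD p 0 + (if c ≠ wc then 1 else 0) := by
          by_cases hcw : c ≠ wc
          · rw [if_pos hcw, if_pos hcw, pv_getD_set mism p _ 0 p hi0, if_pos rfl]
          · rw [if_neg hcw, if_neg hcw]; ring
        rw [hL]
        have h2 : (if p + 1 ≤ p ∧ p < p + 1 + cs.length ∧ cs.getD (p - (p + 1)) ' ' ≠ wc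
            then (1 : Int) else 0) = 0 := if_neg (by rintro ⟨h1, _, _⟩; omega)
        rw [h2]
        have h3 : (if p ≤ p ∧ p < p + (c :: cs).length ∧ (c :: cs).getD (p - p) ' ' ≠ wc
            then (1 : Int) else 0) = (if c ≠ wc then 1 else 0) := by
          by_cases hcw : c ≠ wc
          · rw [if_pos ⟨le_refl _, by simp, by simpa using hcw⟩, if_pos hcw]
          · rw [if_neg (by rintro ⟨_, _, hcc⟩; exact hcw (by simpa using hcc)), if_neg hcw]
        rw [h3]
        ring
      · have hkeep : (if c ≠ wc then mism.set i0 (mism.getD i0 0 + 1) else mism).getD p 0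
            = mism.getD p 0 := by
          split
          · rw [pv_getD_set mism i0 _ 0 p hi0, if_neg hpi]
          · rfl
        rw [hkeep]
        by_cases hlo : i0 + 1 ≤ p
        · have hsub : p - i0 = (p - (i0 + 1)) + 1 := by omega
          have hgetc : (c :: cs).getD (p - i0) ' ' = cs.getD (p - (i0 + 1)) ' ' := by
            rw [hsub]; simp
          congr 1
          rw [hgetc]
          refine if_congr ?_ rfl rfl
          constructor
          · rintro ⟨h1, h2, h3⟩; exact ⟨by omega, by simp; omega, h3⟩
          · rintro ⟨h1, h2, h3⟩; simp at h2; exact ⟨by omega, by omega, h3⟩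
        · rw [if_neg (by rintro ⟨h1, _, _⟩; omega), if_neg (by rintro ⟨h1, _, _⟩; omega)]

-- B's outer loop: after processing a prefix ys of w, mism holds pvCm against ys
theorem pvB_outer (tl wl : List Char) (hmn : wl.length ≤ tl.length)
    (ys : List Char) (hys : ys <+: wl) :
    ((PySem.List.enumerate ys 0).foldl
        (fun mism jwc =>
          (PySem.List.enumerate
              (PySem.List.slice tl (some jwc.1)
                (some (jwc.1 + ((PySem.List.len tl : Int) - PySem.List.len wl + 1)))) 0).foldl
            (fun mism ic =>
              if ic.2 ≠ jwc.2 then PySem.List.pySetD mism ic.1 (PySem.List.pyGetD mism ic.1 0 + 1)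
              else mism)
            mism)
        (List.replicate ((PySem.List.len tl : Int) - PySem.List.len wl + 1).toNat (0 : Int))).length
      = tl.length + 1 - wl.length ∧
    ∀ p : Nat, p < tl.length + 1 - wl.length →
      ((PySem.List.enumerate ys 0).foldl
        (fun mism jwc =>
          (PySem.List.enumerate
              (PySem.List.slice tl (some jwc.1)
                (some (jwc.1 + ((PySem.List.len tl : Int) - PySem.List.len wl + 1)))) 0).foldl
            (fun mism ic =>
              if ic.2 ≠ jwc.2 then PySem.List.pySetD mism ic.1 (PySem.List.pyGetD mism ic.1 0 + 1)
              else mism)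
            mism)
        (List.replicate ((PySem.List.len tl : Int) - PySem.List.len wl + 1).toNat (0 : Int))).getD p 0
      = pvCm tl ys p := by
  have hSnat : ((PySem.List.len tl : Int) - PySem.List.len wl + 1).toNat
      = tl.length + 1 - wl.length := by
    rw [PySem.List.len_eq, PySem.List.len_eq]; omega
  have hS : ((PySem.List.len tl : Int) - PySem.List.len wl + 1)
      = ((tl.length + 1 - wl.length : Nat) : Int) := by
    rw [PySem.List.len_eq, PySem.List.len_eq]; push_cast; omega
  induction ys using List.reverseRecOn with
  | nil =>
      rw [PySem.List.enumerate_nil]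
      simp only [List.foldl_nil]
      constructor
      · rw [List.length_replicate, hSnat]
      · intro p hp
        rw [List.getD_eq_getElem?_getD]
        simp [List.getElem?_replicate, hSnat, hp, pvCm]
        rw [if_pos (by omega)]
        rfl
  | append_singleton zs c ih =>
      have hpre : zs <+: wl := (List.prefix_append zs [c]).trans hys
      have hlt : zs.length < wl.length := by
        have hle := hys.length_le
        simp at hle
        omega
      obtain ⟨ihl, ihg⟩ := ih hpre
      rw [PySem.List.enumerate_append, List.foldl_append,
          PySem.List.enumerate_cons, PySem.List.enumerate_nil]
      simp only [List.foldl_cons, List.foldl_nil, zero_add]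
      have hslice : PySem.List.slice tl (some ((zs.length : Nat) : Int))
          (some (((zs.length : Nat) : Int) + ((PySem.List.len tl : Int) - PySem.List.len wl + 1)))
          = (tl.drop zs.length).take (tl.length + 1 - wl.length) := by
        rw [hS, PySem.List.slice_natCast_add]
      rw [hslice]
      have hcslen : ((tl.drop zs.length).take (tl.length + 1 - wl.length)).length
          = tl.length + 1 - wl.length := by
        simp
        omega
      have h0 := pvB_inner c ((tl.drop zs.length).take (tl.length + 1 - wl.length)) 0
        ((PySem.List.enumerate zs 0).foldl
          (fun mism jwc =>
            (PySem.List.enumerate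
                (PySem.List.slice tl (some jwc.1)
                  (some (jwc.1 + ((PySem.List.len tl : Int) - PySem.List.len wl + 1)))) 0).foldl
              (fun mism ic =>
                if ic.2 ≠ jwc.2 then PySem.List.pySetD mism ic.1 (PySem.List.pyGetD mism ic.1 0 + 1)
                else mism)
              mism)
          (List.replicate ((PySem.List.len tl : Int) - PySem.List.len wl + 1).toNat (0 : Int)))
        (by rw [ihl, hcslen]; omega)
      rw [Nat.cast_zero] at h0
      obtain ⟨h0l, h0g⟩ := h0
      constructor
      · rw [h0l, ihl]
      · intro p hp
        rw [h0g p, ihg p hp]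
        have hget : ((tl.drop zs.length).take (tl.length + 1 - wl.length)).getD p ' '
            = tl.getD (zs.length + p) ' ' := by
          rw [List.getD_eq_getElem?_getD, List.getD_eq_getElem?_getD,
              List.getElem?_take_of_lt hp, List.getElem?_drop]
        have hind : (if 0 ≤ p ∧ p < 0 + ((tl.drop zs.length).take (tl.length + 1 - wl.length)).length
              ∧ ((tl.drop zs.length).take (tl.length + 1 - wl.length)).getD (p - 0) ' ' ≠ c
            then (1 : Int) else 0)
            = (if tl.getD (p + zs.length) ' ' ≠ c then (1 : Int) else 0) := by
          rw [Nat.sub_zero]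
          by_cases hc : tl.getD (p + zs.length) ' ' ≠ c
          · rw [if_pos ⟨Nat.zero_le p, by rw [hcslen]; omega,
                by rw [hget, Nat.add_comm]; exact hc⟩, if_pos hc]
          · rw [if_neg (by rintro ⟨-, -, hcc⟩; rw [hget, Nat.add_comm] at hcc; exact hc hcc),
                if_neg hc]
        rw [hind]
        unfold pvCm
        rw [List.length_append, List.length_cons, List.length_nil, List.range_succ,
            List.countP_append]
        have hcongr : (List.range zs.length).countP
              (fun jj => decide (tl.getD (p + jj) ' ' ≠ (zs ++ [c]).getD jj ' '))
            = (List.range zs.length).countP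
              (fun jj => decide (tl.getD (p + jj) ' ' ≠ zs.getD jj ' ')) := by
          apply List.countP_congr
          intro jj hjj
          have hjlt : jj < zs.length := List.mem_range.mp hjj
          simp [List.getD_eq_getElem?_getD, List.getElem?_append_left hjlt]
        have hlast : (zs ++ [c]).getD zs.length ' ' = c := by
          simp [List.getD_eq_getElem?_getD]
        rw [List.countP_cons, List.countP_nil]
        simp only [hcongr, hlast]
        push_cast
        by_cases hc : tl.getD (p + zs.length) ' ' ≠ c
        · rw [if_pos hc]
          have hc' : ¬tl[p + zs.length]?.getD ' ' = c := by
            simpa [List.getD_eq_getElem?_getD] using hc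
          simp [hc']
        · rw [if_neg hc]
          have hc' : tl[p + zs.length]?.getD ' ' = c := by
            have hcc := not_not.mp hc
            simpa [List.getD_eq_getElem?_getD] using hcc
          simp [hc']

theorem pv_filterMap_if {q : Nat → Prop} [DecidablePred q] (l : List Nat) :
    l.filterMap (fun iN => if q iN then some ((iN : Nat) : Int) else none)
      = List.map (fun i : Nat => (i : Int)) (l.filter (fun i => q i)) := by
  induction l with
  | nil => rfl
  | cons x xs ih =>
      rw [List.filterMap_cons, List.filter_cons]
      by_cases hx : q x
      · rw [if_pos hx, if_pos (by simpa using hx), List.map_cons, ih]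
      · rw [if_neg hx, if_neg (by simpa using hx), ih]

theorem pvB_eq (t w : String) (k : Int) :
    search_similar_patterns_alt t w k = pvSpec t.toList w.toList k := by
  unfold search_similar_patterns_alt
  by_cases hS : (PySem.List.len t.toList : Int) - PySem.List.len w.toList + 1 ≤ 0
  · rw [if_pos hS]
    rw [PySem.List.len_eq, PySem.List.len_eq] at hS
    unfold pvSpec
    rw [show t.toList.length + 1 - w.toList.length = 0 from by omega]
    rfl
  · rw [if_neg hS]
    dsimp only []
    have hmn : w.toList.length ≤ t.toList.length := by
      have := hS
      rw [PySem.List.len_eq, PySem.List.len_eq] at this; omega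
    obtain ⟨hlen, hget⟩ := pvB_outer t.toList w.toList hmn w.toList (List.prefix_refl _)
    set MISM := (PySem.List.enumerate w.toList 0).foldl
        (fun mism jwc =>
          (PySem.List.enumerate
              (PySem.List.slice t.toList (some jwc.1)
                (some (jwc.1 + ((PySem.List.len t.toList : Int) - PySem.List.len w.toList + 1)))) 0).foldl
            (fun mism ic =>
              if ic.2 ≠ jwc.2 then PySem.List.pySetD mism ic.1 (PySem.List.pyGetD mism ic.1 0 + 1)
              else mism)
            mism)
        (List.replicate ((PySem.List.len t.toList : Int) - PySem.List.len w.toList + 1).toNat (0 : Int))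
      with hM
    rw [PySem.List.enumerate_eq_map_pyRange (d := (0 : Int))]
    rw [show PySem.List.len MISM = ((t.toList.length + 1 - w.toList.length : Nat) : Int) from by
      rw [PySem.List.len_eq, hlen]]
    rw [pv_pyRange_nat, List.map_map, List.filterMap_map]
    rw [List.filterMap_congr
        (g := fun iN : Nat =>
          if pvCm t.toList w.toList iN ≤ k then some ((iN : Nat) : Int) else none)
        (by
          intro x hx
          simp only [Function.comp_apply, PySem.List.pyGetD_natCast]
          rw [List.getD_eq_getElem?_getD]
          have hgx := hget x (List.mem_range.mp hx)
          rw [List.getD_eq_getElem?_getD] at hgx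
          rw [hgx])]
    rw [pv_filterMap_if]
    rfl

-- ===== VERDICT (by name: the statement is the Claim_ definition above) =====
theorem search_similar_patterns_spec : Claim_equal_search_similar_patterns := by
  intro t w k _ hpre
  unfold Spec_search_similar_patterns
  rw [pvA_eq t w k hpre, pvB_eq t w k]
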